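-- pv_equiv track=rewrite | github.com/ZJkyle/Cryptography | prob4.py | gf_invert
-- ===== SOURCE A (Python) =====
-- def gf_degree(a):
--     res = 0
--     while a:
--         a >>= 1
--         res += 1
--     return res - 1  # Minus 1 to get the correct degree
--
-- def gf_invert(a, mod):
--     v = mod
--     g1 = 1
--     g2 = 0
--     j = gf_degree(a) - gf_degree(mod)
--
--     while a != 1:
--         if j < 0:
--             a, v = v, a
--             g1, g2 = g2, g1
--             j = -j
--
--         a ^= v << j
--         g1 ^= g2 << j
--
--         while gf_degree(a) >= gf_degree(mod):
--             a ^= mod << (gf_degree(a) - gf_degree(mod))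
--
--         j = gf_degree(a) - gf_degree(v)
--
--     return g1
-- ===== SOURCE B (Python) =====
-- def _gf_polydivmod(a, b):
--     # GF(2)[x] long division: returns (quotient, remainder) of a by b.
--     q = 0
--     while b and a.bit_length() >= b.bit_length():
--         sh = a.bit_length() - b.bit_length()
--         q ^= 1 << sh
--         a ^= b << sh
--     return q, a
--
-- def _gf_clmul(x, y):
--     # carry-less (GF(2)[x]) product of x and y
--     acc = 0
--     while x:
--         if x & 1:
--             acc ^= y
--         x >>= 1
--         y <<= 1
--     return acc
--
-- def gf_invert(a, mod):
--     _, r1 = _gf_polydivmod(a, mod)   # reduce a modulo mod first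
--     r0, s0, s1 = mod, 0, 1
--     while r1 != 1:
--         q, r = _gf_polydivmod(r0, r1)
--         r0, r1, s0, s1 = r1, r, s1, s0 ^ _gf_clmul(q, s1)
--     return s1
-- ===== Notes on version B (the rewrite author's own statement) =====
-- stated objective: alternative
-- what changed: Replaces A's flat degree-aligned shift-and-swap loop (with its inner mod-reduction loop and hand-rolled gf_degree bit loop) by a textbook extended Euclidean algorithm: a long-division helper that returns an explicit quotient and remainder, a carry-less multiply helper, and a Euclid loop updating the Bezout coefficient as s0 ^ clmul(q, s1).
-- outside the precondition, e.g. on gf_invert(1, 1): A returns 1, B returns 0; on gf_invert(1, 0): A returns 1, B returns 1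
import Mathlib
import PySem

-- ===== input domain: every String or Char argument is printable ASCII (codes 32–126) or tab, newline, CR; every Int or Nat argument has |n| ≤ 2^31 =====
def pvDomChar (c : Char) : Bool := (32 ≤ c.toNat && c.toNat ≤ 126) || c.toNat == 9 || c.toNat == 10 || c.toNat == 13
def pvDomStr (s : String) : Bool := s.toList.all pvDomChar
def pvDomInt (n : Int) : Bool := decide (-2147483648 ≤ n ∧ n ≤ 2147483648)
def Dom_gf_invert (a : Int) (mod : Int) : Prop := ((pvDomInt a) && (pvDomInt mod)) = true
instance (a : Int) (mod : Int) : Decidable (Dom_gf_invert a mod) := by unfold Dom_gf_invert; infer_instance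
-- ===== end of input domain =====

-- B replaces A's degree-aligned shift-and-swap loop by a textbook extended Euclidean
-- algorithm built from an explicit quotient/remainder long division and a carry-less
-- multiply (alternative decomposition, same asymptotic cost).


-- Lemmas cited by name in the termination proofs of the loop ports (they must precede the ports).
theorem pv_two_pow_size_le {a : Nat} (ha : a ≠ 0) : 2 ^ (a.size - 1) ≤ a :=
  Nat.lt_size.mp (by have := Nat.size_pos.mpr (Nat.pos_of_ne_zero ha); omega)

theorem pv_xor_msb {a v : Nat} (hv : v ≠ 0) (hle : v.size ≤ a.size) :
    a ^^^ (v <<< (a.size - v.size)) < 2 ^ (a.size - 1) := by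
  have ha : a ≠ 0 := by
    intro h
    subst h
    exact hv (Nat.size_eq_zero.mp (Nat.le_zero.mp (by simpa using hle)))
  have hsa : 1 ≤ a.size := Nat.size_pos.mpr (Nat.pos_of_ne_zero ha)
  have hs : (v <<< (a.size - v.size)).size = a.size := by
    rw [Nat.size_shiftLeft hv]
    omega
  have htop : ∀ x : Nat, x.size = a.size → x.testBit (a.size - 1) = true := by
    intro x hx
    have h1 : 2 ^ (a.size - 1) ≤ x := Nat.lt_size.mp (by omega)
    have h2 : x < 2 ^ a.size := by
      have := Nat.lt_size_self x
      rwa [hx] at this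
    have hpow : 2 ^ a.size = 2 ^ (a.size - 1) * 2 := by
      rw [← Nat.pow_succ]
      congr 1
      omega
    have hdiv : x / 2 ^ (a.size - 1) = 1 := Nat.div_eq_of_lt_le (by omega) (by omega)
    rw [Nat.testBit_eq_decide_div_mod_eq, hdiv]
    rfl
  apply Nat.lt_pow_two_of_testBit
  intro i hi
  rcases Nat.lt_or_ge i a.size with hlt | hge
  · have hieq : i = a.size - 1 := by omega
    subst hieq
    rw [Nat.testBit_xor, htop a rfl, htop _ hs]
    rfl
  · have hb1 : a.testBit i = false :=
      Nat.testBit_lt_two_pow (lt_of_lt_of_le (Nat.lt_size_self a)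
        (Nat.pow_le_pow_right (by norm_num) hge))
    have hb2 : (v <<< (a.size - v.size)).testBit i = false :=
      Nat.testBit_lt_two_pow (lt_of_lt_of_le (by
        have := Nat.lt_size_self (v <<< (a.size - v.size))
        rwa [hs] at this) (Nat.pow_le_pow_right (by norm_num) hge))
    rw [Nat.testBit_xor, hb1, hb2]
    rfl

theorem pv_xor_shift_lt {a v : Nat} (hv : v ≠ 0) (hle : v.size ≤ a.size) :
    a ^^^ (v <<< (a.size - v.size)) < a := by
  have ha : a ≠ 0 := by
    intro h
    subst h
    exact hv (Nat.size_eq_zero.mp (Nat.le_zero.mp (by simpa using hle)))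
  exact lt_of_lt_of_le (pv_xor_msb hv hle) (pv_two_pow_size_le ha)

-- ===== PORT A =====
-- port of gf_degree's `while a: a >>= 1; res += 1` (Python diverges for a < 0; A's loop
-- only reaches it with nonnegative values on admitted inputs)
def pvBlLoop (a res : Nat) : Nat :=
  if h : a = 0 then res else pvBlLoop (a >>> 1) (res + 1)
termination_by a
decreasing_by
  rw [Nat.shiftRight_one]
  exact Nat.div_lt_self (Nat.pos_of_ne_zero h) (by decide)

-- port of gf_degree (returns `res - 1` as a Python int)
def pvDeg (a : Nat) : Int := (pvBlLoop a 0 : Int) - 1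

theorem pvBlLoop_size (a : Nat) : ∀ res, pvBlLoop a res = a.size + res := by
  induction a using Nat.strong_induction_on with
  | _ a ih =>
    intro res
    rw [pvBlLoop]
    split
    · next h => subst h; simp
    · next h =>
      rw [ih (a >>> 1) (by
        rw [Nat.shiftRight_one]
        exact Nat.div_lt_self (Nat.pos_of_ne_zero h) (by decide))]
      have hsz : a.size = (a >>> 1).size + 1 := by
        rw [Nat.shiftRight_one]
        conv_lhs => rw [← Nat.bit_bodd_div2 a]
        rw [Nat.size_bit (by rw [Nat.bit_bodd_div2]; exact h), Nat.div2_val]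
      omega

theorem pvDeg_eq (a : Nat) : pvDeg a = (a.size : Int) - 1 := by
  simp [pvDeg, pvBlLoop_size]

-- A's inner `while gf_degree(a) >= gf_degree(mod)` loop. The `1 ≤ m` guard is only for
-- totality: for mod = 0 that Python loop never returns, and no admitted input reaches it.
def pvRed (a m : Nat) : Nat :=
  if h : 1 ≤ m ∧ pvDeg m ≤ pvDeg a then
    pvRed (a ^^^ (m <<< (pvDeg a - pvDeg m).toNat)) m
  else a
termination_by a
decreasing_by
  have h1 : m ≠ 0 := by omega
  have h2 : m.size ≤ a.size := by
    have := h.2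
    rw [pvDeg_eq, pvDeg_eq] at this
    omega
  have h3 : (pvDeg a - pvDeg m).toNat = a.size - m.size := by
    rw [pvDeg_eq, pvDeg_eq]
    omega
  rw [h3]
  exact pv_xor_shift_lt h1 h2

-- A's outer `while a != 1` loop, fuelled (none = fuel exhausted; the proof below shows the
-- fuel chosen in gf_invert suffices on every input admitted by Pre_). The swap branch is the
-- body after `a, v = v, a; g1, g2 = g2, g1; j = -j`.
def pvALoop (m fuel a v g1 g2 : Nat) (j : Int) : Option Nat :=
  match fuel with
  | 0 => none
  | f + 1 =>
    if a = 1 then some g1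
    else if j < 0 then
      pvALoop m f (pvRed (v ^^^ (a <<< (-j).toNat)) m) a (g2 ^^^ (g1 <<< (-j).toNat)) g1
        (pvDeg (pvRed (v ^^^ (a <<< (-j).toNat)) m) - pvDeg a)
    else
      pvALoop m f (pvRed (a ^^^ (v <<< j.toNat)) m) v (g1 ^^^ (g2 <<< j.toNat)) g2
        (pvDeg (pvRed (a ^^^ (v <<< j.toNat)) m) - pvDeg v)

-- All intermediate Python values are nonnegative on admitted inputs, so the Nat state is exact.
def gf_invert (a : Int) (mod : Int) : Int :=
  match pvALoop mod.toNat (a.toNat + mod.toNat + 2) a.toNat mod.toNat 1 0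
      (pvDeg a.toNat - pvDeg mod.toNat) with
  | some g1 => (g1 : Int)
  | none => 0

-- ===== PORT B =====
-- port of _gf_polydivmod's loop: `q` accumulates the quotient bits, `a` becomes the remainder
def pvQLoop (a b q : Nat) : Nat × Nat :=
  if hc : b ≠ 0 ∧ b.size ≤ a.size then
    pvQLoop (a ^^^ (b <<< (a.size - b.size))) b (q ^^^ (1 <<< (a.size - b.size)))
  else (q, a)
termination_by a
decreasing_by exact pv_xor_shift_lt hc.1 hc.2

-- cited by name in pvEEA's decreasing_by: the remainder of a long division is below the divisor
theorem pvQLoop_snd_lt {b : Nat} (hb : 1 ≤ b) : ∀ a q, (pvQLoop a b q).2 < b := by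
  intro a
  induction a using Nat.strong_induction_on with
  | _ a ih =>
    intro q
    by_cases hc : b.size ≤ a.size
    · rw [pvQLoop, dif_pos ⟨by omega, hc⟩]
      exact ih _ (pv_xor_shift_lt (by omega) hc) _
    · rw [pvQLoop, dif_neg (by intro h; exact hc h.2)]
      have h2 : a < 2 ^ (b.size - 1) :=
        Nat.size_le.mp (by omega)
      exact lt_of_lt_of_le h2 (pv_two_pow_size_le (by omega))

-- port of _gf_clmul's loop (`acc` is the running carry-less product)
def pvClmulLoop (x y acc : Nat) : Nat :=
  if h : x ≠ 0 then
    pvClmulLoop (x >>> 1) (y <<< 1) (if x &&& 1 = 1 then acc ^^^ y else acc)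
  else acc
termination_by x
decreasing_by
  rw [Nat.shiftRight_one]
  exact Nat.div_lt_self (Nat.pos_of_ne_zero h) (by decide)

-- B's `while r1 != 1` Euclid loop. It terminates because the remainder strictly decreases;
-- the `2 ≤ r1` guard merges Python's exit test `r1 == 1` with the (excluded) r1 = 0 case,
-- on which the Python loop never returns.
def pvEEA (r0 r1 s0 s1 : Nat) : Nat :=
  if h : 2 ≤ r1 then
    pvEEA r1 (pvQLoop r0 r1 0).2 s1 (s0 ^^^ pvClmulLoop (pvQLoop r0 r1 0).1 s1 0)
  else s1
termination_by r1
decreasing_by exact pvQLoop_snd_lt (by omega) r0 0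

def gf_invert_alt (a : Int) (mod : Int) : Int :=
  (pvEEA mod.toNat (pvQLoop a.toNat mod.toNat 0).2 0 1 : Int)

-- ===== PRECONDITION & SPEC =====
-- Structural GF(2)-polynomial remainder and gcd used only to STATE coprimality (they compute
-- by kernel reduction; pvGcdAux's first argument is a recursion bound, not a restriction:
-- remainders strictly decrease, so any bound > b gives the true gcd — proved in pvGcdAux_fuel).
def pvPmodAux (b : Nat) : Nat → Nat → Nat
  | a, 0 => a
  | a, d + 1 => pvPmodAux b (if a.size = b.size + d then a ^^^ (b <<< d) else a) d

def pvPmodC (a b : Nat) : Nat := if b = 0 then a else pvPmodAux b a (a.size + 1 - b.size)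

def pvGcdAux : Nat → Nat → Nat → Nat
  | 0, a, _ => a
  | f + 1, a, b => if b = 0 then a else pvGcdAux f b (pvPmodC a b)

def pvGcdC (a b : Nat) : Nat := pvGcdAux (b + 1) a b

-- A returns normally exactly when a ≥ 1, deg mod ≥ 1 and gcd_{GF(2)[x]}(a, mod) = 1;
-- on every other input A loops forever, except the degenerate family a = 1, mod ≤ 1,
-- where A's `while a != 1` never runs and it returns 1: there is no modulus there, the
-- corner is an accident of the loop guard, and B's natural EEA does not reproduce it
-- (at (1,1) A returns 1 while B returns 0), so those inputs are excluded.
def Pre_gf_invert (a : Int) (mod : Int) : Prop :=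
  1 ≤ a ∧ 2 ≤ mod ∧ pvGcdC a.toNat mod.toNat = 1

instance (a : Int) (mod : Int) : Decidable (Pre_gf_invert a mod) := by
  unfold Pre_gf_invert; infer_instance

def pvWitness_gf_invert : Int × Int := (3, 7)

def Spec_gf_invert (a : Int) (mod : Int) (out : Int) : Prop := out = gf_invert_alt a mod
instance (a : Int) (mod : Int) (out : Int) : Decidable (Spec_gf_invert a mod out) := by
  unfold Spec_gf_invert; infer_instance

-- ===== CLAIM (what is proved, stated in full; the proofs are below) =====
def Claim_equal_gf_invert : Prop :=
  ∀ (a : Int) (mod : Int), Dom_gf_invert a mod → Pre_gf_invert a mod →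
    Spec_gf_invert a mod (gf_invert a mod)

-- ===== LEMMAS AND PROOFS =====

-- Proof-layer reference presentation of one long division as a row operation on (g, h);
-- both ports are related to it: A via the phase bisimulation, B via the clmul lemmas.
def pvDivstep (a b g h : Nat) : Nat × Nat :=
  if hc : b ≠ 0 ∧ b.size ≤ a.size then
    pvDivstep (a ^^^ (b <<< (a.size - b.size))) b (g ^^^ (h <<< (a.size - b.size))) h
  else (a, g)
termination_by a
decreasing_by exact pv_xor_shift_lt hc.1 hc.2

-- proof-layer fuelled Euclid loop on the reference divstep
def pvBLoop (fuel r0 r1 s0 s1 : Nat) : Option Nat :=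
  match fuel with
  | 0 => none
  | f + 1 =>
    if r1 = 1 then some s1
    else pvBLoop f r1 (pvDivstep r0 r1 s0 s1).1 s1 (pvDivstep r0 r1 s0 s1).2

theorem pvRed_step {a m : Nat} (h1 : 1 ≤ m) (h2 : m.size ≤ a.size) :
    pvRed a m = pvRed (a ^^^ (m <<< (a.size - m.size))) m := by
  rw [pvRed]
  rw [dif_pos ⟨h1, by rw [pvDeg_eq, pvDeg_eq]; omega⟩]
  have ht : (pvDeg a - pvDeg m).toNat = a.size - m.size := by
    rw [pvDeg_eq, pvDeg_eq]
    omega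
  rw [ht]

theorem pvRed_base {a m : Nat} (h : a.size < m.size ∨ m = 0) : pvRed a m = a := by
  rw [pvRed, dif_neg]
  intro hc
  have := hc.2
  rw [pvDeg_eq, pvDeg_eq] at this
  omega

theorem pvRed_size {m : Nat} (hm : 1 ≤ m) : ∀ a, (pvRed a m).size < m.size := by
  intro a
  induction a using Nat.strong_induction_on with
  | _ a ih =>
    by_cases hc : m.size ≤ a.size
    · rw [pvRed_step hm hc]
      exact ih _ (pv_xor_shift_lt (by omega) hc)
    · rw [pvRed_base (Or.inl (by omega))]
      omega

theorem pvRed_lt {m : Nat} (hm : 1 ≤ m) (a : Nat) : pvRed a m < m := by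
  have h1 : (pvRed a m).size < m.size := pvRed_size hm a
  have h2 : pvRed a m < 2 ^ (m.size - 1) := Nat.size_le.mp (by omega)
  exact lt_of_lt_of_le h2 (pv_two_pow_size_le (by omega))

theorem pvDivstep_fst (b : Nat) : ∀ a g h, (pvDivstep a b g h).1 = pvRed a b := by
  intro a
  induction a using Nat.strong_induction_on with
  | _ a ih =>
    intro g h
    by_cases hc : b ≠ 0 ∧ b.size ≤ a.size
    · rw [pvDivstep, dif_pos hc, ih _ (pv_xor_shift_lt hc.1 hc.2),
        pvRed_step (by omega) hc.2]
    · rw [pvDivstep, dif_neg hc]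
      rcases Nat.eq_zero_or_pos b with hb | hb
      · exact (pvRed_base (Or.inr hb)).symm
      · have : a.size < b.size := by
          rcases not_and_or.mp hc with h' | h'
          · omega
          · omega
        exact (pvRed_base (Or.inl this)).symm

-- B's divmod remainder is the same reference remainder
theorem pvQLoop_snd (b : Nat) : ∀ a q, (pvQLoop a b q).2 = pvRed a b := by
  intro a
  induction a using Nat.strong_induction_on with
  | _ a ih =>
    intro q
    by_cases hc : b ≠ 0 ∧ b.size ≤ a.size
    · rw [pvQLoop, dif_pos hc, ih _ (pv_xor_shift_lt hc.1 hc.2),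
        pvRed_step (by omega) hc.2]
    · rw [pvQLoop, dif_neg hc]
      rcases Nat.eq_zero_or_pos b with hb | hb
      · exact (pvRed_base (Or.inr hb)).symm
      · have : a.size < b.size := by
          rcases not_and_or.mp hc with h' | h'
          · omega
          · omega
        exact (pvRed_base (Or.inl this)).symm

theorem pvClmulLoop_acc : ∀ x y acc z, pvClmulLoop x y (acc ^^^ z) = pvClmulLoop x y acc ^^^ z := by
  intro x
  induction x using Nat.strong_induction_on with
  | _ x ih =>
    intro y acc z
    by_cases hx : x = 0
    · rw [pvClmulLoop, dif_neg (by omega), pvClmulLoop, dif_neg (by omega)]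
    · have hlt : x >>> 1 < x := by
        rw [Nat.shiftRight_one]
        exact Nat.div_lt_self (Nat.pos_of_ne_zero hx) (by decide)
      rw [pvClmulLoop, dif_pos hx]
      conv_rhs => rw [pvClmulLoop, dif_pos hx]
      by_cases hb : x &&& 1 = 1
      · rw [if_pos hb, if_pos hb]
        have : acc ^^^ z ^^^ y = (acc ^^^ y) ^^^ z := by
          rw [Nat.xor_assoc, Nat.xor_assoc, Nat.xor_comm z y]
        rw [this, ih _ hlt]
      · rw [if_neg hb, if_neg hb, ih _ hlt]

theorem pvClmulLoop_zero (y : Nat) : pvClmulLoop 0 y 0 = 0 := by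
  rw [pvClmulLoop, dif_neg (by omega)]

theorem pvClmulLoop_shift_one : ∀ sh y, pvClmulLoop (1 <<< sh) y 0 = y <<< sh := by
  intro sh
  induction sh with
  | zero =>
    intro y
    simp only [Nat.shiftLeft_zero]
    rw [pvClmulLoop, dif_pos (by decide : (1 : Nat) ≠ 0),
      if_pos (by decide : (1 : Nat) &&& 1 = 1), Nat.zero_xor,
      (by decide : (1 : Nat) >>> 1 = 0), pvClmulLoop, dif_neg (by simp)]
  | succ sh ih =>
    intro y
    have hval : (1 : Nat) <<< (sh + 1) = 2 ^ (sh + 1) := by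
      rw [Nat.shiftLeft_eq, one_mul]
    have hne : (1 : Nat) <<< (sh + 1) ≠ 0 := by
      rw [hval]
      positivity
    have hbit : (1 : Nat) <<< (sh + 1) &&& 1 ≠ 1 := by
      rw [Nat.and_one_is_mod, hval, pow_succ, Nat.mul_mod_left]
      omega
    have hshr : (1 : Nat) <<< (sh + 1) >>> 1 = 1 <<< sh := by
      rw [hval, Nat.shiftRight_one, pow_succ, Nat.shiftLeft_eq, one_mul]
      omega
    rw [pvClmulLoop, dif_pos hne, if_neg hbit, hshr, ih, ← Nat.shiftLeft_add,
      Nat.add_comm 1 sh]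

theorem pv_shiftRight_xor (x z : Nat) : (x ^^^ z) >>> 1 = x >>> 1 ^^^ z >>> 1 := by
  apply Nat.eq_of_testBit_eq
  intro i
  simp [Nat.testBit_shiftRight, Nat.testBit_xor]

theorem pv_and_one_xor (x z : Nat) : (x ^^^ z) &&& 1 = (x &&& 1) ^^^ (z &&& 1) := by
  rw [Nat.and_xor_distrib_right]

theorem pvClmulLoop_lin : ∀ x z y, pvClmulLoop (x ^^^ z) y 0 = pvClmulLoop x y 0 ^^^ pvClmulLoop z y 0 := by
  intro x
  induction x using Nat.strong_induction_on with
  | _ x ih =>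
    intro z y
    by_cases hx : x = 0
    · subst hx
      rw [pvClmulLoop_zero, Nat.zero_xor, Nat.zero_xor]
    · by_cases hz : z = 0
      · subst hz
        rw [pvClmulLoop_zero, Nat.xor_zero, Nat.xor_zero]
      · have hlt : x >>> 1 < x := by
          rw [Nat.shiftRight_one]
          exact Nat.div_lt_self (Nat.pos_of_ne_zero hx) (by decide)
        -- unfold the two RHS loops one step, pulling the accumulator out
        have unf : ∀ w : Nat, w ≠ 0 → pvClmulLoop w y 0
            = pvClmulLoop (w >>> 1) (y <<< 1) 0 ^^^ (if w &&& 1 = 1 then y else 0) := by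
          intro w hw
          rw [pvClmulLoop, dif_pos hw]
          by_cases hb : w &&& 1 = 1
          · simp only [if_pos hb]
            exact pvClmulLoop_acc _ _ _ _
          · simp only [if_neg hb, Nat.xor_zero]
        by_cases hxz : x ^^^ z = 0
        · have hxe : x = z := by
            have := Nat.xor_eq_zero.mp hxz
            exact this
          subst hxe
          rw [hxz, pvClmulLoop_zero, Nat.xor_self]
        · rw [unf _ hxz, unf _ hx, unf _ hz, pv_shiftRight_xor, ih _ hlt, pv_and_one_xor]
          have hx1 : x &&& 1 = 0 ∨ x &&& 1 = 1 := by
            rw [Nat.and_one_is_mod]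
            omega
          have hz1 : z &&& 1 = 0 ∨ z &&& 1 = 1 := by
            rw [Nat.and_one_is_mod]
            omega
          set A := pvClmulLoop (x >>> 1) (y <<< 1) 0
          set B := pvClmulLoop (z >>> 1) (y <<< 1) 0
          rcases hx1 with h1 | h1 <;> rcases hz1 with h2 | h2 <;>
            simp [h1, h2, Nat.xor_comm, Nat.xor_left_comm]

-- the reference row operation on g equals XORing in the carry-less product of the quotient
theorem pvDivstep_g_xor (b h : Nat) :
    ∀ a g x, (pvDivstep a b (g ^^^ x) h).2 = (pvDivstep a b g h).2 ^^^ x := by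
  intro a
  induction a using Nat.strong_induction_on with
  | _ a ih =>
    intro g x
    by_cases hc : b ≠ 0 ∧ b.size ≤ a.size
    · rw [pvDivstep, dif_pos hc]
      conv_rhs => rw [pvDivstep, dif_pos hc]
      have : g ^^^ x ^^^ (h <<< (a.size - b.size)) = (g ^^^ h <<< (a.size - b.size)) ^^^ x := by
        rw [Nat.xor_assoc, Nat.xor_assoc, Nat.xor_comm x]
      rw [this, ih _ (pv_xor_shift_lt hc.1 hc.2)]
    · rw [pvDivstep, dif_neg hc]
      conv_rhs => rw [pvDivstep, dif_neg hc]

theorem pvQLoop_combine (b h : Nat) :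
    ∀ a q g, g ^^^ pvClmulLoop (pvQLoop a b q).1 h 0
      = pvClmulLoop q h 0 ^^^ (pvDivstep a b g h).2 := by
  intro a
  induction a using Nat.strong_induction_on with
  | _ a ih =>
    intro q g
    by_cases hc : b ≠ 0 ∧ b.size ≤ a.size
    · rw [pvQLoop, dif_pos hc]
      conv_rhs => rw [pvDivstep, dif_pos hc]
      rw [ih _ (pv_xor_shift_lt hc.1 hc.2), pvClmulLoop_lin, pvClmulLoop_shift_one,
        pvDivstep_g_xor]
      rw [Nat.xor_assoc, Nat.xor_comm (h <<< (a.size - b.size))]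
    · rw [pvQLoop, dif_neg hc]
      conv_rhs => rw [pvDivstep, dif_neg hc]
      exact Nat.xor_comm g _

theorem pvPmodAux_eq {b : Nat} (hb : b ≠ 0) :
    ∀ n a, a.size < b.size + n → pvPmodAux b a n = pvRed a b := by
  intro n
  induction n with
  | zero =>
    intro a ha
    rw [pvPmodAux, pvRed_base (Or.inl (by omega))]
  | succ n ih =>
    intro a ha
    rw [pvPmodAux]
    by_cases hc : a.size = b.size + n
    · rw [if_pos hc]
      have hle : b.size ≤ a.size := by omega
      have hd : a.size - b.size = n := by omega
      have hlt : (a ^^^ (b <<< n)).size < b.size + n := by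
        have hx : (a ^^^ (b <<< n)).size ≤ a.size - 1 := by
          apply Nat.size_le.mpr
          have h1 := pv_xor_msb hb hle
          rwa [hd] at h1
        have hb1 : 1 ≤ b.size := Nat.size_pos.mpr (Nat.pos_of_ne_zero hb)
        omega
      rw [ih _ hlt]
      have := pvRed_step (a := a) (m := b) (by omega) hle
      rw [hd] at this
      exact this.symm
    · rw [if_neg hc]
      exact ih a (by omega)

theorem pvPmodC_eq (a b : Nat) : pvPmodC a b = pvRed a b := by
  rw [pvPmodC]
  by_cases hb : b = 0
  · rw [if_pos hb, hb, pvRed_base (Or.inr rfl)]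
  · rw [if_neg hb]
    exact pvPmodAux_eq hb _ a (by
      have : 1 ≤ b.size := Nat.size_pos.mpr (Nat.pos_of_ne_zero hb)
      omega)

theorem pvGcdAux_fuel : ∀ f₁ f₂ a b, b < f₁ → b < f₂ →
    pvGcdAux f₁ a b = pvGcdAux f₂ a b := by
  intro f₁
  induction f₁ with
  | zero => intro f₂ a b h1; omega
  | succ f₁ ih =>
    intro f₂ a b h1 h2
    match f₂, h2 with
    | f₂ + 1, h2 =>
      rw [pvGcdAux, pvGcdAux]
      by_cases hb : b = 0
      · rw [if_pos hb, if_pos hb]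
      · rw [if_neg hb, if_neg hb]
        have hlt : pvPmodC a b < b := by
          rw [pvPmodC_eq]
          exact pvRed_lt (by omega) a
        exact ih f₂ b (pvPmodC a b) (by omega) (by omega)

theorem pvGcdC_step {b : Nat} (hb : b ≠ 0) (a : Nat) :
    pvGcdC a b = pvGcdC b (pvRed a b) := by
  have hlt : pvPmodC a b < b := by
    rw [pvPmodC_eq]
    exact pvRed_lt (by omega) a
  rw [pvGcdC, pvGcdAux, if_neg hb, pvGcdC, ← pvPmodC_eq]
  exact pvGcdAux_fuel _ _ b (pvPmodC a b) (by omega) (by omega)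

theorem pvGcdC_zero (a : Nat) : pvGcdC a 0 = a := by
  rw [pvGcdC, pvGcdAux, if_pos rfl]

theorem pv_size_ge_two {v : Nat} (hv : 2 ≤ v) : 2 ≤ v.size := by
  have : 1 < v.size := Nat.lt_size.mpr (by omega)
  omega

theorem pv_ge_two_of_size {a : Nat} (ha : 2 ≤ a.size) : 2 ≤ a := by
  have h := pv_two_pow_size_le (a := a) (by
    intro h; rw [h] at ha; simp at ha)
  have : 2 ^ 1 ≤ 2 ^ (a.size - 1) := Nat.pow_le_pow_right (by norm_num) (by omega)
  omega

-- Division-phase bisimulation: inside one long division A's outer iterations (no swap,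
-- j ≥ 0) perform exactly pvDivstep's steps; k counts the consumed fuel.
theorem pvPhase : ∀ a m v g1 g2 : Nat, 2 ≤ v → a.size ≤ m.size →
    ∃ k, k + (pvDivstep a v g1 g2).1 ≤ a ∧ ∀ f,
      pvALoop m f a v g1 g2 (pvDeg a - pvDeg v)
        = pvALoop m (f - k) (pvDivstep a v g1 g2).1 v (pvDivstep a v g1 g2).2 g2
            (pvDeg (pvDivstep a v g1 g2).1 - pvDeg v) := by
  intro a
  induction a using Nat.strong_induction_on with
  | _ a ih =>
    intro m v g1 g2 hv hm
    by_cases hc : v.size ≤ a.size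
    · have hv0 : v ≠ 0 := by omega
      have haa : a ^^^ (v <<< (a.size - v.size)) < a := pv_xor_shift_lt hv0 hc
      have hsz : (a ^^^ (v <<< (a.size - v.size))).size ≤ a.size - 1 :=
        Nat.size_le.mpr (pv_xor_msb hv0 hc)
      have hva : 2 ≤ a := pv_ge_two_of_size (le_trans (pv_size_ge_two hv) hc)
      have hds : pvDivstep a v g1 g2
          = pvDivstep (a ^^^ (v <<< (a.size - v.size))) v
              (g1 ^^^ (g2 <<< (a.size - v.size))) g2 := by
        rw [pvDivstep, dif_pos ⟨hv0, hc⟩]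
      obtain ⟨k, hk, heq⟩ := ih (a ^^^ (v <<< (a.size - v.size))) haa m v
        (g1 ^^^ (g2 <<< (a.size - v.size))) g2 hv (by omega)
      refine ⟨k + 1, by rw [hds]; omega, ?_⟩
      intro f
      cases f with
      | zero =>
        have h0 : (0 : Nat) - (k + 1) = 0 := by omega
        rw [h0]
        rfl
      | succ f =>
        have hne1 : a ≠ 1 := by omega
        have hjnn : ¬(pvDeg a - pvDeg v < 0) := by
          rw [pvDeg_eq, pvDeg_eq]
          omega
        have hjt : (pvDeg a - pvDeg v).toNat = a.size - v.size := by
          rw [pvDeg_eq, pvDeg_eq]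
          omega
        have hred : pvRed (a ^^^ (v <<< (a.size - v.size))) m
            = a ^^^ (v <<< (a.size - v.size)) := by
          apply pvRed_base
          left
          have : 2 ≤ a.size := le_trans (pv_size_ge_two hv) hc
          omega
        have hstep : pvALoop m (f + 1) a v g1 g2 (pvDeg a - pvDeg v)
            = pvALoop m f (a ^^^ (v <<< (a.size - v.size))) v
                (g1 ^^^ (g2 <<< (a.size - v.size))) g2
                (pvDeg (a ^^^ (v <<< (a.size - v.size))) - pvDeg v) := by
          show (if a = 1 then some g1 else _) = _
          rw [if_neg hne1, if_neg hjnn, hjt, hred]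
        rw [hstep, heq f, hds]
        congr 1
        omega
    · have hds : pvDivstep a v g1 g2 = (a, g1) := by
        rw [pvDivstep, dif_neg (by
          intro h
          exact hc h.2)]
      exact ⟨0, by simp [hds], fun f => by rw [hds]; simp⟩

-- Main bisimulation: at each Euclid boundary A's state (a, v, g1, g2) equals the reference
-- loop's (r1, r0, s1, s0); both loops end with the same Bezout coefficient.
theorem pvMain : ∀ r1 m r0 s0 s1 fA fB : Nat,
    pvGcdC r0 r1 = 1 → 1 ≤ r1 → r1.size < r0.size → r0.size ≤ m.size →
    r0 + r1 + 1 ≤ fA → r1 + 1 ≤ fB →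
    pvALoop m fA r1 r0 s1 s0 (pvDeg r1 - pvDeg r0) = pvBLoop fB r0 r1 s0 s1
      ∧ (pvBLoop fB r0 r1 s0 s1).isSome = true := by
  intro r1
  induction r1 using Nat.strong_induction_on with
  | _ r1 ih =>
    intro m r0 s0 s1 fA fB hg hr1 hsz hm hfA hfB
    match fA, hfA, fB, hfB with
    | fA + 1, hfA, fB + 1, hfB =>
      by_cases h1 : r1 = 1
      · subst h1
        constructor
        · show (if (1 : Nat) = 1 then some s1 else _)
            = (if (1 : Nat) = 1 then some s1 else _)
          rw [if_pos rfl, if_pos rfl]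
        · show (if (1 : Nat) = 1 then some s1 else _).isSome = true
          rw [if_pos rfl]
          rfl
      · -- one swap iteration of A + the division phase = one pvBLoop iteration
        have hr2 : 2 ≤ r1 := by omega
        have hr0sz : 2 ≤ r0.size := by
          have := pv_size_ge_two hr2
          omega
        have hr0two : 2 ≤ r0 := pv_ge_two_of_size hr0sz
        have hr00 : r1 ≠ 0 := by omega
        have hjlt : pvDeg r1 - pvDeg r0 < 0 := by
          rw [pvDeg_eq, pvDeg_eq]
          have : 1 ≤ r1.size := Nat.size_pos.mpr (by omega)
          omega
        have hjt : (-(pvDeg r1 - pvDeg r0)).toNat = r0.size - r1.size := by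
          rw [pvDeg_eq, pvDeg_eq]
          have : 1 ≤ r1.size := Nat.size_pos.mpr (by omega)
          omega
        set a1 := r0 ^^^ (r1 <<< (r0.size - r1.size)) with ha1
        have ha1lt : a1 < r0 := pv_xor_shift_lt hr00 (by omega)
        have ha1sz : a1.size ≤ r0.size - 1 := Nat.size_le.mpr (pv_xor_msb hr00 (by omega))
        have hred1 : pvRed a1 m = a1 := pvRed_base (Or.inl (by omega))
        -- the divstep of the reference loop, unfolded once
        set r := pvRed r0 r1 with hrdef
        have hfst : (pvDivstep r0 r1 s0 s1).1 = r := pvDivstep_fst r1 r0 s0 s1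
        have hds : pvDivstep r0 r1 s0 s1
            = pvDivstep a1 r1 (s0 ^^^ (s1 <<< (r0.size - r1.size))) s1 := by
          rw [pvDivstep, dif_pos ⟨hr00, by omega⟩]
        -- gcd bookkeeping
        have hgr : pvGcdC r1 r = 1 := by
          rw [← pvGcdC_step hr00]
          exact hg
        have hrpos : 1 ≤ r := by
          rcases Nat.eq_zero_or_pos r with h0 | h0
          · rw [h0, pvGcdC_zero] at hgr
            omega
          · exact h0
        have hrsz : r.size < r1.size := pvRed_size (by omega) r0
        have hrlt : r < r1 := pvRed_lt (by omega) r0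
        -- A: swap iteration
        have hswap : pvALoop m (fA + 1) r1 r0 s1 s0 (pvDeg r1 - pvDeg r0)
            = pvALoop m fA (pvRed a1 m) r1 (s0 ^^^ (s1 <<< (r0.size - r1.size))) s1
                (pvDeg (pvRed a1 m) - pvDeg r1) := by
          show (if r1 = 1 then some s1 else _) = _
          rw [if_neg h1, if_pos hjlt, hjt]
        -- A: division phase
        obtain ⟨k, hk, hphase⟩ := pvPhase a1 m r1 (s0 ^^^ (s1 <<< (r0.size - r1.size))) s1
          hr2 (by omega)
        have hphase' := hphase fA
        rw [← hds, hfst] at hphase'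
        rw [← hds, hfst] at hk
        -- IH at the next boundary
        obtain ⟨hihEq, hihSome⟩ := ih r hrlt m r1 s1 (pvDivstep r0 r1 s0 s1).2 (fA - k) fB
          hgr hrpos hrsz (by omega) (by omega) (by omega)
        constructor
        · rw [hswap, hred1, hphase', hihEq]
          show _ = (if r1 = 1 then some s1 else _)
          rw [if_neg h1, hfst]
        · have : pvBLoop (fB + 1) r0 r1 s0 s1
              = pvBLoop fB r1 r s1 (pvDivstep r0 r1 s0 s1).2 := by
            show (if r1 = 1 then some s1 else _) = _
            rw [if_neg h1, hfst]
          rw [this]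
          exact hihSome

-- Bridge: the reference fuelled loop computes exactly B's well-founded EEA loop.
theorem pvBridge : ∀ f r1 r0 s0 s1 s : Nat,
    pvGcdC r0 r1 = 1 → 1 ≤ r1 → r1.size < r0.size →
    pvBLoop f r0 r1 s0 s1 = some s → pvEEA r0 r1 s0 s1 = s := by
  intro f
  induction f with
  | zero => intro r1 r0 s0 s1 s _ _ _ h; exact absurd h (by simp [pvBLoop])
  | succ f ih =>
    intro r1 r0 s0 s1 s hg hr1 hsz hb
    by_cases h1 : r1 = 1
    · subst h1
      have hs : s1 = s := by
        have : pvBLoop (f + 1) r0 1 s0 s1 = some s1 := by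
          show (if (1 : Nat) = 1 then some s1 else _) = some s1
          rw [if_pos rfl]
        rw [this] at hb
        exact Option.some.inj hb
      rw [pvEEA, dif_neg (by omega)]
      exact hs
    · have hr2 : 2 ≤ r1 := by omega
      have hbstep : pvBLoop (f + 1) r0 r1 s0 s1
          = pvBLoop f r1 (pvDivstep r0 r1 s0 s1).1 s1 (pvDivstep r0 r1 s0 s1).2 := by
        show (if r1 = 1 then some s1 else _) = _
        rw [if_neg h1]
      set r := pvRed r0 r1 with hrdef
      have hfst : (pvDivstep r0 r1 s0 s1).1 = r := pvDivstep_fst r1 r0 s0 s1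
      have hgr : pvGcdC r1 r = 1 := by
        rw [← pvGcdC_step (by omega)]
        exact hg
      have hrpos : 1 ≤ r := by
        rcases Nat.eq_zero_or_pos r with h0 | h0
        · rw [h0, pvGcdC_zero] at hgr
          omega
        · exact h0
      have hrsz : r.size < r1.size := pvRed_size (by omega) r0
      have hbnext : pvBLoop f r1 r s1 (pvDivstep r0 r1 s0 s1).2 = some s := by
        rw [← hfst, ← hbstep]
        exact hb
      have hih := ih r r1 s1 (pvDivstep r0 r1 s0 s1).2 s hgr hrpos hrsz hbnext
      rw [pvEEA, dif_pos hr2, pvQLoop_snd]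
      have hcomb : s0 ^^^ pvClmulLoop (pvQLoop r0 r1 0).1 s1 0
          = (pvDivstep r0 r1 s0 s1).2 := by
        have := pvQLoop_combine r1 s1 r0 0 s0
        rwa [pvClmulLoop_zero, Nat.zero_xor] at this
      rw [hcomb]
      exact hih

theorem pv_invert_nat (A M : Nat) (hA1 : 1 ≤ A) (hM2 : 2 ≤ M) (hg : pvGcdC A M = 1) :
    pvALoop M (A + M + 2) A M 1 0 (pvDeg A - pvDeg M)
      = pvBLoop (A + M + 2) M (pvRed A M) 0 1
      ∧ (pvBLoop (A + M + 2) M (pvRed A M) 0 1).isSome = true := by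
  have hMsz : 2 ≤ M.size := pv_size_ge_two hM2
  have hAsz : 1 ≤ A.size := Nat.size_pos.mpr (by omega)
  set r1 := pvRed A M with hr1
  have hgr : pvGcdC M r1 = 1 := by
    rw [← pvGcdC_step (by omega)]
    exact hg
  have hr1sz : r1.size < M.size := pvRed_size (by omega) A
  have hr1pos : 1 ≤ r1 := by
    rcases Nat.eq_zero_or_pos r1 with h0 | h0
    · rw [h0, pvGcdC_zero] at hgr
      omega
    · exact h0
  by_cases hcase : A.size < M.size
  · -- a is already reduced: the initial state is a Euclid boundary
    have hr1A : r1 = A := by rw [hr1, pvRed_base (Or.inl hcase)]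
    rw [hr1A]
    exact pvMain A M M 0 1 (A + M + 2) (A + M + 2) (by rw [← hr1A]; exact hgr)
      (by omega) (by omega) (by omega) (by omega) (by omega)
  · -- first A iteration reduces a mod m (g2 = 0 keeps g1 = 1)
    have hle : M.size ≤ A.size := by omega
    have hA2 : 2 ≤ A := pv_ge_two_of_size (by omega)
    have hjnn : ¬(pvDeg A - pvDeg M < 0) := by
      rw [pvDeg_eq, pvDeg_eq]
      omega
    have hjt : (pvDeg A - pvDeg M).toNat = A.size - M.size := by
      rw [pvDeg_eq, pvDeg_eq]
      omega
    have hr1step : pvRed (A ^^^ (M <<< (A.size - M.size))) M = r1 :=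
      (pvRed_step (by omega) hle).symm
    have hfirst : pvALoop M (A + M + 2) A M 1 0 (pvDeg A - pvDeg M)
        = pvALoop M (A + M + 1) r1 M 1 0 (pvDeg r1 - pvDeg M) := by
      show (if A = 1 then some 1 else _) = _
      rw [if_neg (by omega), if_neg hjnn, hjt, hr1step]
      norm_num
    have hr1le : r1 ≤ A := by
      have h2 : r1 < 2 ^ (M.size - 1) := Nat.size_le.mp (by omega)
      have h3 : 2 ^ (M.size - 1) ≤ 2 ^ (A.size - 1) :=
        Nat.pow_le_pow_right (by norm_num) (by omega)
      have h4 := pv_two_pow_size_le (a := A) (by omega)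
      omega
    rw [hfirst]
    exact pvMain r1 M M 0 1 (A + M + 1) (A + M + 2) hgr hr1pos hr1sz (le_refl _)
      (by omega) (by omega)

-- ===== VERDICT (by name: the statement is the Claim_ definition above) =====
theorem gf_invert_spec : Claim_equal_gf_invert := by
  intro a mod _ hpre
  obtain ⟨ha, hm, hg⟩ := hpre
  unfold Spec_gf_invert
  set A := a.toNat
  set M := mod.toNat
  have hA1 : 1 ≤ A := by omega
  have hM2 : 2 ≤ M := by omega
  obtain ⟨heq, hsome⟩ := pv_invert_nat A M hA1 hM2 hg
  obtain ⟨s, hs⟩ := Option.isSome_iff_exists.mp hsome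
  have hgcdM : pvGcdC M (pvRed A M) = 1 := by
    rw [← pvGcdC_step (by omega)]
    exact hg
  have hrpos : 1 ≤ pvRed A M := by
    rcases Nat.eq_zero_or_pos (pvRed A M) with h0 | h0
    · rw [h0, pvGcdC_zero] at hgcdM
      omega
    · exact h0
  have hrsz : (pvRed A M).size < M.size := pvRed_size (by omega) A
  have hEEA : pvEEA M (pvRed A M) 0 1 = s :=
    pvBridge (A + M + 2) (pvRed A M) M 0 1 s hgcdM hrpos hrsz hs
  rw [gf_invert, gf_invert_alt, heq, hs, pvQLoop_snd, hEEA]
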